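-- pv_equiv track=rewrite | github.com/xiaobingling93-pixel/Ascend-RAGSDK | mx_rag/corag/evaluator.py | _select_documents_for_recall
-- ===== SOURCE A (Python) =====
-- from typing import List, Dict, Any, Tuple, Optional
--
-- def _select_documents_for_recall(documents: List[List[str]], num_contexts: int) -> List[str]:
--     """智能选择文档用于召回率计算，确保文档来源的多样性和公平性。
--
--     Args:
--         documents: 所有子查询的文档列表，每个子查询对应一个文档列表
--         num_contexts: 文档数量限制
--
--     Returns:
--         选择后的文档列表
--     """
--     all_documents = []
--     document_sources = []  # Track which subquery each document comes from
--
--     if documents: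
--         for subquery_idx, docs in enumerate(documents):
--             for doc in docs:
--                 all_documents.append(doc)
--                 document_sources.append(subquery_idx)
--
--     # Remove duplicate documents while preserving order and source information
--     seen = set()
--     unique_documents = []
--     unique_sources = []
--
--     for doc, source in zip(all_documents, document_sources):
--         if doc not in seen:
--             seen.add(doc)
--             unique_documents.append(doc)
--             unique_sources.append(source)
--
--     # Apply a sophisticated document selection strategy
--     if unique_documents:
--         num_subqueries = max(unique_sources) + 1 if unique_sources else 1
--         # Calculate base allocation per subquery
--         base_per_subquery = num_contexts // num_subqueries
--         # Calculate remaining documents after base allocation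
--         remaining = num_contexts % num_subqueries
--
--         # Allocate documents from each subquery
--         limited_documents = []
--         for subquery_idx in range(num_subqueries):
--             # Select documents from current subquery
--             subquery_docs = [doc for doc, src in zip(unique_documents, unique_sources) if src == subquery_idx]
--             # Determine how many documents to take from this subquery
--             take_count = base_per_subquery + (1 if subquery_idx < remaining else 0)
--             # Add documents to the result
--             limited_documents.extend(subquery_docs[:take_count])
--             # If we've already reached the limit, break
--             if len(limited_documents) >= num_contexts:
--                 break
--
--         # If still not enough documents, fill with remaining documents
--         if len(limited_documents) < num_contexts:
--             # Get documents not yet selected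
--             selected_docs = set(limited_documents)
--             remaining_docs = [doc for doc in unique_documents if doc not in selected_docs]
--             # Add remaining documents up to the limit
--             limited_documents.extend(remaining_docs[:num_contexts - len(limited_documents)])
--     else:
--         limited_documents = []
--
--     return limited_documents
-- ===== SOURCE B (Python) =====
-- def _select_documents_for_recall(documents, num_contexts):
--     """One-pass re-implementation: dedup and group documents by source while
--     flattening, then allocate per-subquery quotas from the prebuilt groups."""
--     seen = set()
--     uniq = []            # (doc, source) pairs, first-occurrence order
--     groups = {}          # source -> its unique docs, in order
--     for src, docs in enumerate(documents):
--         for doc in docs: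
--             if doc not in seen:
--                 seen.add(doc)
--                 uniq.append((doc, src))
--                 groups.setdefault(src, []).append(doc)
--     if not uniq:
--         return []
--     num_subqueries = uniq[-1][1] + 1
--     base, rem = divmod(num_contexts, num_subqueries)
--     result = []
--     for src in range(num_subqueries):
--         result.extend(groups.get(src, [])[: base + (1 if src < rem else 0)])
--         if len(result) >= num_contexts:
--             break
--     if len(result) < num_contexts:
--         chosen = set(result)
--         extra = [d for d, _ in uniq if d not in chosen]
--         result.extend(extra[: num_contexts - len(result)])
--     return result
-- ===== Notes on version B (the rewrite author's own statement) =====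
-- stated objective: faster
-- what changed: B deduplicates and groups the documents by source subquery in a single pass over the input (a dict of per-source lists plus one (doc, source) list), so the per-subquery allocation reads a prebuilt group instead of A's rescan of the whole unique-document list for every subquery, and the number of subqueries is read off the last unique pair instead of a max() pass.
import Mathlib
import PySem

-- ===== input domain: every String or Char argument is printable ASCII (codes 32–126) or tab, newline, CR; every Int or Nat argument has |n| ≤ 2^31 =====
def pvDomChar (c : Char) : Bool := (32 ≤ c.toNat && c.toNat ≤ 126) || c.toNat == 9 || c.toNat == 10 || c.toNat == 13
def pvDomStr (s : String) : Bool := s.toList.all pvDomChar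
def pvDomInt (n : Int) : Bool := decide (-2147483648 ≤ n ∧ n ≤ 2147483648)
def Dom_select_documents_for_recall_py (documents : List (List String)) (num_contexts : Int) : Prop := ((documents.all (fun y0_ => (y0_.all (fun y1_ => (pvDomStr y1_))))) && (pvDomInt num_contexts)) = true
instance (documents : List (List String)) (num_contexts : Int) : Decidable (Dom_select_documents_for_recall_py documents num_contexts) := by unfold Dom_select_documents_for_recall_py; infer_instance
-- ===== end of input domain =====

-- B builds the per-source groups once while flattening and deduplicating in a single pass,
-- replacing A's per-subquery rescans of the whole unique-document list (objective: faster).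


-- ===== PORT A =====
-- for subquery_idx, docs in enumerate(documents): for doc in docs: all_documents.append(doc); document_sources.append(subquery_idx)
def pvFlatA (documents : List (List String)) : List String × List Int :=
  if documents.isEmpty then ([], [])
  else
    (PySem.List.enumerate documents).foldl
      (fun st p => p.2.foldl (fun st2 doc => (st2.1 ++ [doc], st2.2 ++ [p.1])) st)
      ([], [])

-- for doc, source in zip(all_documents, document_sources): if doc not in seen: seen.add(doc); append to both lists
def pvDedupA (pairs : List (String × Int)) :
    PySem.Set String × List String × List Int :=
  pairs.foldl
    (fun st p =>
      if PySem.Set.contains st.1 p.1 then st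
      else (PySem.Set.add st.1 p.1, st.2.1 ++ [p.1], st.2.2 ++ [p.2]))
    (PySem.Set.empty, [], [])

-- for subquery_idx in range(num_subqueries): … with the early break
def pvAllocA (uniqD : List String) (uniqS : List Int) (base rem n : Int) :
    List Int → List String → List String
  | [], acc => acc
  | i :: rest, acc =>
    let sub := ((uniqD.zip uniqS).filter (fun p => p.2 == i)).map Prod.fst
    let acc' := acc ++ PySem.List.slice sub none (some (base + (if i < rem then 1 else 0)))
    if n ≤ (acc'.length : Int) then acc' else pvAllocA uniqD uniqS base rem n rest acc'

def select_documents_for_recall_py (documents : List (List String)) (num_contexts : Int) : List String :=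
  let fl := pvFlatA documents
  let st := pvDedupA (fl.1.zip fl.2)
  let uniqD := st.2.1
  let uniqS := st.2.2
  if uniqD.isEmpty then []
  else
    -- num_subqueries = max(unique_sources) + 1 if unique_sources else 1
    let num_subqueries := if uniqS.isEmpty then 1 else ((PySem.List.max? uniqS id).getD 0) + 1
    let base := PySem.Int.floordiv num_contexts num_subqueries
    let rem := PySem.Int.mod num_contexts num_subqueries
    let limited := pvAllocA uniqD uniqS base rem num_contexts
      (PySem.List.pyRange 0 num_subqueries 1) []
    if (limited.length : Int) < num_contexts then
      let selected := PySem.Set.ofList limited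
      let remaining := uniqD.filter (fun d => !(PySem.Set.contains selected d))
      limited ++ PySem.List.slice remaining none (some (num_contexts - (limited.length : Int)))
    else limited

-- ===== PORT B =====
-- for src in range(num_subqueries): result.extend(groups.get(src, [])[:take]); break when full
def pvAllocB (groups : PySem.Dict Int (List String)) (base rem n : Int) :
    List Int → List String → List String
  | [], acc => acc
  | i :: rest, acc =>
    let acc' := acc ++ PySem.List.slice (groups.getD i []) none (some (base + (if i < rem then 1 else 0)))
    if n ≤ (acc'.length : Int) then acc' else pvAllocB groups base rem n rest acc'

def select_documents_for_recall_py_alt (documents : List (List String)) (num_contexts : Int) : List String :=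
  -- single grouping pass: seen set, uniq (doc, src) list, groups dict
  -- (groups.setdefault(src, []).append(doc) ported as insert of getD src [] ++ [doc])
  let st := (PySem.List.enumerate documents).foldl
    (fun st p => p.2.foldl
      (fun st2 doc =>
        if PySem.Set.contains st2.1 doc then st2
        else (PySem.Set.add st2.1 doc, st2.2.1 ++ [(doc, p.1)],
              st2.2.2.insert p.1 (st2.2.2.getD p.1 [] ++ [doc])))
      st)
    (PySem.Set.empty, ([], PySem.Dict.empty))
  let uniq := st.2.1
  let groups := st.2.2
  if uniq.isEmpty then []
  else
    let num_subqueries := (PySem.List.pyGetD uniq (-1) ("", 0)).2 + 1   -- uniq[-1][1] + 1 (uniq nonempty here)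
    let base := PySem.Int.floordiv num_contexts num_subqueries
    let rem := PySem.Int.mod num_contexts num_subqueries
    let result := pvAllocB groups base rem num_contexts
      (PySem.List.pyRange 0 num_subqueries 1) []
    if (result.length : Int) < num_contexts then
      let chosen := PySem.Set.ofList result
      let extra := (uniq.filter (fun p => !(PySem.Set.contains chosen p.1))).map Prod.fst
      result ++ PySem.List.slice extra none (some (num_contexts - (result.length : Int)))
    else result

-- ===== PRECONDITION & SPEC =====
def Spec_select_documents_for_recall_py (documents : List (List String)) (num_contexts : Int) (out : List String) : Prop := out = select_documents_for_recall_py_alt documents num_contexts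
instance (documents : List (List String)) (num_contexts : Int) (out : List String) : Decidable (Spec_select_documents_for_recall_py documents num_contexts out) := by unfold Spec_select_documents_for_recall_py; infer_instance

-- ===== CLAIM (what is proved, stated in full; the proofs are below) =====
def Claim_equal_select_documents_for_recall_py : Prop := ∀ (documents : List (List String)) (num_contexts : Int), Dom_select_documents_for_recall_py documents num_contexts → Spec_select_documents_for_recall_py documents num_contexts (select_documents_for_recall_py documents num_contexts)

-- ===== LEMMAS AND PROOFS =====

def pvFlat (i : Int) : List (List String) → List (String × Int)
  | [] => []
  | d :: t => d.map (fun s => (s, i)) ++ pvFlat (i + 1) t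

theorem pvFlatAux (l : List (List String)) : ∀ (i : Int) (st : List String × List Int),
    (PySem.List.enumerate l i).foldl
      (fun st p => p.2.foldl (fun st2 doc => (st2.1 ++ [doc], st2.2 ++ [p.1])) st) st
    = (st.1 ++ (pvFlat i l).map Prod.fst, st.2 ++ (pvFlat i l).map Prod.snd) := by
  induction l with
  | nil => intro i st; simp [PySem.List.enumerate, pvFlat]
  | cons d t ih =>
    intro i st
    have he : PySem.List.enumerate (d :: t) i = (i, d) :: PySem.List.enumerate t (i+1) := by
      simp [PySem.List.enumerate]
    rw [he]
    simp only [List.foldl_cons]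
    rw [PySem.List.foldl_prod_mk (f := fun a (e : String) => a ++ [e])
        (g := fun a (_ : String) => a ++ [i]), ih]
    rw [PySem.List.foldl_append_singleton_eq_self,
        PySem.List.foldl_append_singleton_eq_map (f := fun (_ : String) => i)]
    simp [pvFlat, Function.comp_def, List.map_const']

def pvStepB (st : PySem.Set String × List (String × Int) × PySem.Dict Int (List String))
    (q : String × Int) :
    PySem.Set String × List (String × Int) × PySem.Dict Int (List String) :=
  if PySem.Set.contains st.1 q.1 then st
  else (PySem.Set.add st.1 q.1, st.2.1 ++ [q],
        st.2.2.insert q.2 (st.2.2.getD q.2 [] ++ [q.1]))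

theorem pvScanBAux (l : List (List String)) : ∀ (i : Int)
    (st : PySem.Set String × List (String × Int) × PySem.Dict Int (List String)),
    (PySem.List.enumerate l i).foldl
      (fun st p => p.2.foldl
        (fun st2 doc =>
          if PySem.Set.contains st2.1 doc then st2
          else (PySem.Set.add st2.1 doc, st2.2.1 ++ [(doc, p.1)],
                st2.2.2.insert p.1 (st2.2.2.getD p.1 [] ++ [doc])))
        st)
      st
    = (pvFlat i l).foldl pvStepB st := by
  induction l with
  | nil => intro i st; simp [PySem.List.enumerate, pvFlat]
  | cons d t ih =>
    intro i st
    have he : PySem.List.enumerate (d :: t) i = (i, d) :: PySem.List.enumerate t (i+1) := by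
      simp [PySem.List.enumerate]
    rw [he]
    simp only [List.foldl_cons, pvFlat, List.foldl_append, ih]
    congr 1
    rw [List.foldl_map]
    rfl

theorem pvDedupA_proj (P : List (String × Int)) : ∀ (seen : PySem.Set String)
    (uq : List (String × Int)) (gr : PySem.Dict Int (List String)),
    P.foldl
      (fun st p =>
        if PySem.Set.contains st.1 p.1 then st
        else (PySem.Set.add st.1 p.1, st.2.1 ++ [p.1], st.2.2 ++ [p.2]))
      (seen, uq.map Prod.fst, uq.map Prod.snd)
    = ((P.foldl pvStepB (seen, uq, gr)).1,
       (P.foldl pvStepB (seen, uq, gr)).2.1.map Prod.fst,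
       (P.foldl pvStepB (seen, uq, gr)).2.1.map Prod.snd) := by
  induction P with
  | nil => intro seen uq gr; rfl
  | cons p t ih =>
    intro seen uq gr
    simp only [List.foldl_cons, pvStepB]
    by_cases h : PySem.Set.contains seen p.1
    · simp only [h, if_true]
      exact ih seen uq gr
    · simp only [h, Bool.false_eq_true, if_false]
      have := ih (PySem.Set.add seen p.1) (uq ++ [p])
        (gr.insert p.2 (gr.getD p.2 [] ++ [p.1]))
      simpa using this

theorem pvScan_groups (P : List (String × Int)) : ∀ (seen : PySem.Set String)
    (uq : List (String × Int)) (gr : PySem.Dict Int (List String)),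
    (∀ s : Int, gr.getD s [] = (uq.filter (fun p => p.2 == s)).map Prod.fst) →
    ∀ s : Int, (P.foldl pvStepB (seen, uq, gr)).2.2.getD s []
      = ((P.foldl pvStepB (seen, uq, gr)).2.1.filter (fun p => p.2 == s)).map Prod.fst := by
  induction P with
  | nil => intro seen uq gr hg s; exact hg s
  | cons p t ih =>
    intro seen uq gr hg s
    simp only [List.foldl_cons, pvStepB]
    by_cases h : PySem.Set.contains seen p.1
    · simp only [h, if_true]
      exact ih seen uq gr hg s
    · simp only [h, Bool.false_eq_true, if_false]
      apply ih
      intro s'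
      rw [PySem.Dict.getD_insert]
      by_cases hs : s' = p.2
      · subst hs
        simp [List.filter_append, hg p.2]
      · simp [hs, hg s', List.filter_append]
        exact fun hpe => absurd hpe.symm hs

theorem pvScan_sublist (P : List (String × Int)) : ∀ (seen : PySem.Set String)
    (uq : List (String × Int)) (gr : PySem.Dict Int (List String)),
    (P.foldl pvStepB (seen, uq, gr)).2.1.Sublist (uq ++ P) := by
  induction P with
  | nil => intro seen uq gr; simp
  | cons p t ih =>
    intro seen uq gr
    simp only [List.foldl_cons, pvStepB]
    by_cases h : PySem.Set.contains seen p.1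
    · simp only [h, if_true]
      have := ih seen uq gr
      exact this.trans ((List.sublist_cons_self p t).append_left uq)
    · simp only [h, Bool.false_eq_true, if_false]
      have := ih (PySem.Set.add seen p.1) (uq ++ [p]) (gr.insert p.2 (gr.getD p.2 [] ++ [p.1]))
      rw [List.append_assoc] at this
      exact this

theorem pvChain_le_getLast : ∀ (l : List Int), l.Pairwise (· ≤ ·) → ∀ (hne : l ≠ []),
    ∀ x ∈ l, x ≤ l.getLast hne := by
  intro l
  induction l with
  | nil => intro _ hne; exact absurd rfl hne
  | cons a t ih =>
    intro hp hne x hx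
    cases t with
    | nil => simp at hx; simp [hx]
    | cons b t' =>
      rw [List.getLast_cons (by simp)]
      rcases List.mem_cons.mp hx with rfl | hxt
      · have hab := (List.pairwise_cons.mp hp).1
        have hlast : (b :: t').getLast (by simp) ∈ b :: t' := List.getLast_mem _
        exact (hab _ hlast)
      · exact ih (List.pairwise_cons.mp hp).2 (by simp) x hxt

theorem pvMax_chain (l : List Int) (h : l.Pairwise (· ≤ ·)) (hne : l ≠ []) :
    PySem.List.max? l id = some (l.getLast hne) := by
  obtain ⟨m, hm⟩ : ∃ m, PySem.List.max? l id = some m := by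
    cases hmm : PySem.List.max? l id with
    | none => exact absurd ((PySem.List.max?_eq_none_iff l id).mp hmm) hne
    | some m => exact ⟨m, rfl⟩
  rw [hm]
  congr 1
  have hmem := PySem.List.max?_mem hm
  have hub := PySem.List.max?_isMax hm
  have h2 : l.getLast hne ≤ m := by simpa using hub _ (List.getLast_mem hne)
  have h1 : m ≤ l.getLast hne := pvChain_le_getLast l h hne m hmem
  omega


theorem pvFlat_snd_ge (t : List (List String)) : ∀ (j : Int) (x : Int),
    x ∈ (pvFlat j t).map Prod.snd → j ≤ x := by
  induction t with
  | nil => intro j x hx; simp [pvFlat] at hx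
  | cons d t ih =>
    intro j x hx
    simp only [pvFlat, List.map_append, List.mem_append, List.map_map] at hx
    rcases hx with h | h
    · simp [Function.comp] at h
      omega
    · have := ih (j + 1) x (by simpa using h)
      omega

theorem pvFlat_snd_chain (documents : List (List String)) : ∀ (i : Int),
    ((pvFlat i documents).map Prod.snd).Pairwise (· ≤ ·) := by
  induction documents with
  | nil => intro i; simp [pvFlat]
  | cons d t ih =>
    intro i
    simp only [pvFlat, List.map_append]
    apply List.pairwise_append.mpr
    refine ⟨?_, ih (i + 1), ?_⟩
    · simp [List.map_map, Function.comp_def, List.map_const', List.pairwise_replicate]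
    · intro a ha b hb
      simp [List.map_map, Function.comp] at ha
      have := pvFlat_snd_ge t (i + 1) b hb
      omega

theorem pvAlloc_eq (uniqD : List String) (uniqS : List Int)
    (groups : PySem.Dict Int (List String)) (base rem n : Int)
    (h : ∀ i : Int, ((uniqD.zip uniqS).filter (fun p => p.2 == i)).map Prod.fst
          = groups.getD i []) :
    ∀ (idxs : List Int) (acc : List String),
      pvAllocA uniqD uniqS base rem n idxs acc = pvAllocB groups base rem n idxs acc := by
  intro idxs
  induction idxs with
  | nil => intro acc; rfl
  | cons i rest ih =>
    intro acc
    simp only [pvAllocA, pvAllocB, h i]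
    split <;> split
    · rfl
    · exact ih _
    · rfl
    · exact ih _

theorem pvFlatA_eq (documents : List (List String)) :
    pvFlatA documents = ((pvFlat 0 documents).map Prod.fst, (pvFlat 0 documents).map Prod.snd) := by
  unfold pvFlatA
  split
  · next h => simp_all [List.isEmpty_iff, pvFlat]
  · exact (pvFlatAux documents 0 ([], [])).trans (by simp)

theorem pvStA_eq (documents : List (List String)) :
    pvDedupA ((pvFlatA documents).1.zip (pvFlatA documents).2)
    = (((pvFlat 0 documents).foldl pvStepB (PySem.Set.empty, [], PySem.Dict.empty)).1,
       ((pvFlat 0 documents).foldl pvStepB (PySem.Set.empty, [], PySem.Dict.empty)).2.1.map Prod.fst,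
       ((pvFlat 0 documents).foldl pvStepB (PySem.Set.empty, [], PySem.Dict.empty)).2.1.map Prod.snd) := by
  rw [pvFlatA_eq]
  dsimp only
  rw [show (List.map Prod.fst (pvFlat 0 documents)).zip (List.map Prod.snd (pvFlat 0 documents))
        = pvFlat 0 documents from Eq.symm (List.zip_of_prod rfl rfl)]
  exact pvDedupA_proj (pvFlat 0 documents) PySem.Set.empty [] PySem.Dict.empty

-- ===== VERDICT (by name: the statement is the Claim_ definition above) =====
theorem select_documents_for_recall_py_spec : Claim_equal_select_documents_for_recall_py := by
  intro documents num_contexts _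
  unfold Spec_select_documents_for_recall_py
  unfold select_documents_for_recall_py select_documents_for_recall_py_alt
  dsimp only
  rw [pvScanBAux documents 0, pvStA_eq]
  dsimp only
  set b := (pvFlat 0 documents).foldl pvStepB (PySem.Set.empty, [], PySem.Dict.empty) with hb
  by_cases hu : b.2.1 = []
  · simp [hu]
  · have huf : (b.2.1.map Prod.fst).isEmpty = false := by
      simp [hu]
    have hus : (b.2.1.map Prod.snd).isEmpty = false := by
      simp [hu]
    have hub : b.2.1.isEmpty = false := by simp [hu]
    have hsnd_ne : b.2.1.map Prod.snd ≠ [] := by simp [hu]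
    have hchain : (b.2.1.map Prod.snd).Pairwise (· ≤ ·) := by
      have hsub : b.2.1.Sublist ([] ++ pvFlat 0 documents) := by
        rw [hb]; exact pvScan_sublist _ _ _ _
      exact List.Pairwise.sublist (hsub.map Prod.snd) (by simpa using pvFlat_snd_chain documents 0)
    have hns : (PySem.List.max? (b.2.1.map Prod.snd) id).getD 0 + 1
        = (PySem.List.pyGetD b.2.1 (-1) ("", 0)).2 + 1 := by
      rw [pvMax_chain _ hchain hsnd_ne, PySem.List.pyGetD_neg_one _ _ hu]
      simp [List.getLast_map]
    have hgr : ∀ i : Int, (((b.2.1.map Prod.fst).zip (b.2.1.map Prod.snd)).filter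
          (fun p => p.2 == i)).map Prod.fst = b.2.2.getD i [] := by
      intro i
      rw [show (b.2.1.map Prod.fst).zip (b.2.1.map Prod.snd) = b.2.1 from
            Eq.symm (List.zip_of_prod rfl rfl)]
      rw [hb]
      exact (pvScan_groups (pvFlat 0 documents) PySem.Set.empty [] PySem.Dict.empty
        (by intro s; simp [PySem.Dict.getD_empty]) i).symm
    simp only [huf, hus, hub, Bool.false_eq_true, if_false, hns]
    rw [pvAlloc_eq _ _ _ _ _ _ hgr]
    set L := pvAllocB b.2.2 (PySem.Int.floordiv num_contexts ((PySem.List.pyGetD b.2.1 (-1) ("", 0)).2 + 1))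
      (PySem.Int.mod num_contexts ((PySem.List.pyGetD b.2.1 (-1) ("", 0)).2 + 1)) num_contexts
      (PySem.List.pyRange 0 ((PySem.List.pyGetD b.2.1 (-1) ("", 0)).2 + 1) 1) [] with hL
    by_cases hfill : (L.length : Int) < num_contexts
    · simp only [hfill, if_true]
      congr 1
      congr 1
      rw [List.filter_map]
      simp [Function.comp_def]
    · simp only [hfill, if_false]
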